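-- pv_equiv track=rewrite | github.com/ChoiSuhyeonA/infoSec | rsa_1.py | getMultiBlockFromText
-- ===== SOURCE A (Python) =====
-- def getMultiBlockFromText(msg, BLOCK_SIZE, BYTE_SIZE):
--     blockInt = []
--     for blockStart in range(0, len(msg), BLOCK_SIZE):
--         totSum = 0
--         i = 0
--         for val in msg[blockStart:blockStart+BLOCK_SIZE]:
--             totSum += ord(val) * BYTE_SIZE ** i
--             i += 1
--         blockInt.append(totSum)
--     return blockInt
-- ===== SOURCE B (Python) =====
-- def getMultiBlockFromText(msg, BLOCK_SIZE, BYTE_SIZE):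
--     if BLOCK_SIZE <= 0:
--         return []
--     blockInt = []
--     rest = msg
--     while rest:
--         block, rest = rest[:BLOCK_SIZE], rest[BLOCK_SIZE:]
--         totSum = 0
--         for val in reversed(block):
--             totSum = totSum * BYTE_SIZE + ord(val)
--         blockInt.append(totSum)
--     return blockInt
-- ===== Notes on version B (the rewrite author's own statement) =====
-- stated objective: alternative
-- what changed: B replaces A's index-range loop with per-character powers ord(val)*BYTE_SIZE**i by a while-loop that destructures the remaining string into (block, rest) and evaluates each block by Horner's rule over the reversed block, with an explicit empty return for non-positive BLOCK_SIZE; no range(), no index tracking, no exponentiation.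
-- crash fix: For BLOCK_SIZE == 0 A raises ValueError (range() arg 3 must not be zero) while B returns []. — e.g. on getMultiBlockFromText("ab", 0, 256): A raises ValueError, B returns []
import Mathlib
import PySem

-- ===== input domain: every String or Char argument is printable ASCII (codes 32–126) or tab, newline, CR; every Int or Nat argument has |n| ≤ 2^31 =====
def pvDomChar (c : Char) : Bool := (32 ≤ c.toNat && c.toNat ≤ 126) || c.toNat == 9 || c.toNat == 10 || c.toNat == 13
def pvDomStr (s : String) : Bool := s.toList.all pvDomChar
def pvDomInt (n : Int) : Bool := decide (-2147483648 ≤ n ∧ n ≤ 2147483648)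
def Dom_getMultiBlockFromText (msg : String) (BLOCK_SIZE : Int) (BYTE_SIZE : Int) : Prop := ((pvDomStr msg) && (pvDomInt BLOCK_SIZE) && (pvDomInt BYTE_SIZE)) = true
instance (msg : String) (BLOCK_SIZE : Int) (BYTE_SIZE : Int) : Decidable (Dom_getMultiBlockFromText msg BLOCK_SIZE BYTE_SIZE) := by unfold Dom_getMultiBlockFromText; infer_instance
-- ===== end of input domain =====

-- B replaces A's index-range loop with powers ord(val)*BYTE_SIZE**i by a while-loop that
-- destructures the remaining string into (block, rest) and evaluates each block by Horner's
-- rule over the reversed block (alternative decomposition; no range(), no exponentiation).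


-- ===== PORT A =====
-- i is a Nat: in A it starts at 0 and is only incremented, so 'BYTE_SIZE ** i' is the
-- Nat-exponent power.
def getMultiBlockFromText (msg : String) (BLOCK_SIZE : Int) (BYTE_SIZE : Int) : List Int :=
  (PySem.List.pyRange 0 (PySem.Str.len msg) BLOCK_SIZE).foldl
    (fun blockInt blockStart =>
      let block := PySem.List.slice msg.toList (some blockStart) (some (blockStart + BLOCK_SIZE))
      let st := block.foldl
        (fun (st : Int × Nat) val => (st.1 + (val.toNat : Int) * BYTE_SIZE ^ st.2, st.2 + 1))
        (0, 0)
      blockInt ++ [st.1]) []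

-- ===== PORT B =====
-- Horner step over the reversed block: 'for val in reversed(block): totSum = totSum*B + ord(val)'.
def pvHorner (B : Int) (block : List Char) : Int :=
  block.reverse.foldl (fun totSum val => totSum * B + (val.toNat : Int)) 0

-- The while-loop of Source B as structural recursion on the remaining characters; it is only
-- entered with 0 < K (Source B returns [] first for BLOCK_SIZE <= 0), so rest[:K] / rest[K:]
-- are exactly take/drop of K.toNat (slices with a positive bound).
def pvAltGo (K B : Int) (hK : 0 < K) : List Char → List Int
  | [] => []
  | c :: cs =>
      pvHorner B ((c :: cs).take K.toNat) :: pvAltGo K B hK ((c :: cs).drop K.toNat)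
termination_by l => l.length
decreasing_by
  simp only [List.length_drop, List.length_cons]
  omega

def getMultiBlockFromText_alt (msg : String) (BLOCK_SIZE : Int) (BYTE_SIZE : Int) : List Int :=
  if h : BLOCK_SIZE ≤ 0 then []
  else pvAltGo BLOCK_SIZE BYTE_SIZE (by omega) msg.toList

-- ===== PRECONDITION & SPEC =====
-- Python's range(0, len(msg), BLOCK_SIZE) raises ValueError when the step is 0.
def Pre_getMultiBlockFromText (msg : String) (BLOCK_SIZE : Int) (BYTE_SIZE : Int) : Prop :=
  BLOCK_SIZE ≠ 0
instance (msg : String) (BLOCK_SIZE : Int) (BYTE_SIZE : Int) : Decidable (Pre_getMultiBlockFromText msg BLOCK_SIZE BYTE_SIZE) := by unfold Pre_getMultiBlockFromText; infer_instance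
def pvWitness_getMultiBlockFromText : String × Int × Int := ("hello", 2, 256)

-- For BLOCK_SIZE == 0 A raises ValueError (range() arg 3 must not be zero) while B returns [].
def Raises_getMultiBlockFromText (msg : String) (BLOCK_SIZE : Int) (BYTE_SIZE : Int) : Prop :=
  BLOCK_SIZE = 0
instance (msg : String) (BLOCK_SIZE : Int) (BYTE_SIZE : Int) : Decidable (Raises_getMultiBlockFromText msg BLOCK_SIZE BYTE_SIZE) := by unfold Raises_getMultiBlockFromText; infer_instance
def pvRaiseWitness_getMultiBlockFromText : String × Int × Int := ("ab", 0, 256)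
def pvRaiseWitnessOut_getMultiBlockFromText : List Int := []

def Spec_getMultiBlockFromText (msg : String) (BLOCK_SIZE : Int) (BYTE_SIZE : Int) (out : List Int) : Prop := out = getMultiBlockFromText_alt msg BLOCK_SIZE BYTE_SIZE
instance (msg : String) (BLOCK_SIZE : Int) (BYTE_SIZE : Int) (out : List Int) : Decidable (Spec_getMultiBlockFromText msg BLOCK_SIZE BYTE_SIZE out) := by unfold Spec_getMultiBlockFromText; infer_instance

-- ===== CLAIM (what is proved, stated in full; the proofs are below) =====
def Claim_equal_getMultiBlockFromText : Prop := ∀ (msg : String) (BLOCK_SIZE : Int) (BYTE_SIZE : Int), Dom_getMultiBlockFromText msg BLOCK_SIZE BYTE_SIZE → Pre_getMultiBlockFromText msg BLOCK_SIZE BYTE_SIZE → Spec_getMultiBlockFromText msg BLOCK_SIZE BYTE_SIZE (getMultiBlockFromText msg BLOCK_SIZE BYTE_SIZE)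
def Claim_raises_getMultiBlockFromText : Prop := (∀ (msg : String) (BLOCK_SIZE : Int) (BYTE_SIZE : Int), Dom_getMultiBlockFromText msg BLOCK_SIZE BYTE_SIZE → Raises_getMultiBlockFromText msg BLOCK_SIZE BYTE_SIZE → ¬ Pre_getMultiBlockFromText msg BLOCK_SIZE BYTE_SIZE) ∧ (Dom_getMultiBlockFromText (pvRaiseWitness_getMultiBlockFromText.1) (pvRaiseWitness_getMultiBlockFromText.2.1) (pvRaiseWitness_getMultiBlockFromText.2.2) ∧ Raises_getMultiBlockFromText (pvRaiseWitness_getMultiBlockFromText.1) (pvRaiseWitness_getMultiBlockFromText.2.1) (pvRaiseWitness_getMultiBlockFromText.2.2) ∧ getMultiBlockFromText_alt (pvRaiseWitness_getMultiBlockFromText.1) (pvRaiseWitness_getMultiBlockFromText.2.1) (pvRaiseWitness_getMultiBlockFromText.2.2) = pvRaiseWitnessOut_getMultiBlockFromText)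

-- ===== LEMMAS AND PROOFS =====

-- A's indexed power-sum over a block equals Horner evaluation of the reversed block.
theorem pvHorner_eq (B : Int) (l : List Char) (s : Int) (i : Nat) :
    (l.foldl (fun (st : Int × Nat) val => (st.1 + (val.toNat : Int) * B ^ st.2, st.2 + 1)) (s, i)).1
      = s + B ^ i * pvHorner B l := by
  unfold pvHorner
  induction l generalizing s i with
  | nil => simp
  | cons c l ih =>
      simp only [List.foldl_cons, List.reverse_cons, List.foldl_append, List.foldl_cons,
        List.foldl_nil] at *
      rw [ih]
      ring

-- range(a, b, s) with positive step is empty when b ≤ a.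
theorem pvRange_nil_of_le (a b s : Int) (hs : 0 < s) (h : b ≤ a) :
    PySem.List.pyRange a b s = [] := by
  rw [PySem.List.pyRange_of_pos _ _ hs, if_neg (by omega)]
  simp

-- range(a, b, s) with negative step and a ≤ b is empty.
theorem pvRange_nil_of_neg (a b s : Int) (hs : s < 0) (h : a ≤ b) :
    PySem.List.pyRange a b s = [] := by
  unfold PySem.List.pyRange
  rw [if_neg (by omega)]
  simp only []
  rw [if_neg (by omega), if_neg (by omega)]
  simp

-- head step: range(a, b, s) = a :: range(a+s, b, s) for positive s, a < b.
theorem pvRange_pos_cons (a b s : Int) (hs : 0 < s) (h : a < b) :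
    PySem.List.pyRange a b s = a :: PySem.List.pyRange (a + s) b s := by
  rw [PySem.List.pyRange_of_pos _ _ hs, PySem.List.pyRange_of_pos _ _ hs]
  rw [if_pos h]
  have hcount : ((b - a + s - 1) / s).toNat
      = (if a + s < b then ((b - (a + s) + s - 1) / s).toNat else 0) + 1 := by
    have key : (b - a + s - 1) / s = (b - a - 1) / s + 1 := by
      have : b - a + s - 1 = (b - a - 1) + 1 * s := by ring
      rw [this, Int.add_mul_ediv_right _ _ (by omega)]
    split_ifs with h2
    · have : b - (a + s) + s - 1 = b - a - 1 := by ring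
      rw [this]
      have hnn : 0 ≤ (b - a - 1) / s := Int.ediv_nonneg (by omega) (by omega)
      omega
    · have hz : (b - a - 1) / s = 0 := Int.ediv_eq_zero_of_lt (by omega) (by omega)
      omega
  rw [hcount, List.range_succ_eq_map]
  simp only [List.map_cons, List.map_map, Nat.cast_zero, mul_zero, add_zero]
  congr 1
  apply List.map_congr_left
  intro k _
  simp only [Function.comp_apply]
  push_cast
  ring

-- shift: range(a, b, s) = (range(0, b-a, s)).map (· + a) for positive s.
theorem pvRange_shift (a b s : Int) (hs : 0 < s) :
    PySem.List.pyRange a b s = (PySem.List.pyRange 0 (b - a) s).map (· + a) := by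
  rw [PySem.List.pyRange_of_pos _ _ hs, PySem.List.pyRange_of_pos _ _ hs]
  simp only [sub_zero, zero_add, List.map_map]
  rw [show (if a < b then ((b - a + s - 1) / s).toNat else 0)
        = (if 0 < b - a then ((b - a + s - 1) / s).toNat else 0) from by
    by_cases h : a < b
    · rw [if_pos h, if_pos (by omega)]
    · rw [if_neg h, if_neg (by omega)]]
  apply List.map_congr_left
  intro k _
  simp only [Function.comp_apply]
  ring

-- a block of l at offset bs+K is the block of (l.drop K) at offset bs (0 ≤ bs, 0 < K).
theorem pvSlice_shift (l : List Char) (bs K : Int) (hbs : 0 ≤ bs) (hK : 0 < K) :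
    PySem.List.slice l (some (bs + K)) (some (bs + K + K))
      = PySem.List.slice (l.drop K.toNat) (some bs) (some (bs + K)) := by
  have h1 := PySem.List.slice_natCast_add l (bs.toNat + K.toNat) K.toNat
  have h2 := PySem.List.slice_natCast_add (l.drop K.toNat) bs.toNat K.toNat
  rw [show ((bs.toNat + K.toNat : Nat) : Int) = bs + K from by push_cast; omega,
    Int.toNat_of_nonneg (by omega : (0 : Int) ≤ K)] at h1
  rw [Int.toNat_of_nonneg hbs, Int.toNat_of_nonneg (by omega : (0 : Int) ≤ K)] at h2
  rw [h1, h2, List.drop_drop, Nat.add_comm]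

-- main loop correspondence: A's foldl over range(0, len l, K) with Horner block values
-- equals the while-loop recursion of B, for positive K.
theorem pvMain (K B : Int) (hK : 0 < K) (n : Nat) :
    ∀ (l : List Char), l.length = n → ∀ (acc : List Int),
    (PySem.List.pyRange 0 (l.length : Int) K).foldl
      (fun blockInt bs =>
        blockInt ++ [pvHorner B (PySem.List.slice l (some bs) (some (bs + K)))]) acc
      = acc ++ pvAltGo K B hK l := by
  induction n using Nat.strong_induction_on with
  | _ n ih =>
    intro l hl acc
    match l with
    | [] => simp [pvAltGo, pvRange_nil_of_le 0 0 K hK le_rfl]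
    | c :: cs =>
      simp only [List.length_cons] at hl
      have hlen : (0 : Int) < ((c :: cs).length : Int) := by simp
      rw [pvRange_pos_cons 0 _ K hK hlen, List.foldl_cons]
      have hblock0 : PySem.List.slice (c :: cs) (some 0) (some (0 + K))
          = (c :: cs).take K.toNat := by
        have ht := PySem.List.slice_to_natCast (c :: cs) K.toNat
        rw [Int.toNat_of_nonneg (by omega : (0 : Int) ≤ K)] at ht
        rw [zero_add, PySem.List.slice_zero_start, ht]
      rw [hblock0]
      rw [zero_add, pvRange_shift K _ K hK, List.foldl_map]
      have hcong : ∀ (a : List Int), ∀ bs ∈ PySem.List.pyRange 0 (((c :: cs).length : Int) - K) K,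
          a ++ [pvHorner B (PySem.List.slice (c :: cs) (some (bs + K)) (some (bs + K + K)))]
            = a ++ [pvHorner B
                (PySem.List.slice ((c :: cs).drop K.toNat) (some bs) (some (bs + K)))] := by
        intro a bs hbs
        have h0 : 0 ≤ bs := ((PySem.List.mem_pyRange_iff_of_pos hK bs).1 hbs).1
        rw [pvSlice_shift _ bs K h0 hK]
      rw [PySem.List.foldl_congr_mem _ _ _ _ hcong]
      have hlen2 : PySem.List.pyRange 0 (((c :: cs).length : Int) - K) K
          = PySem.List.pyRange 0 (((c :: cs).drop K.toNat).length : Int) K := by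
        by_cases hc : K ≤ ((c :: cs).length : Int)
        · simp only [List.length_cons] at hc
          congr 1
          simp only [List.length_drop, List.length_cons]
          push_cast
          omega
        · simp only [List.length_cons] at hc
          rw [pvRange_nil_of_le _ _ _ hK (by simp only [List.length_cons]; push_cast; omega),
            pvRange_nil_of_le _ _ _ hK
              (by simp only [List.length_drop, List.length_cons]; omega)]
      rw [hlen2]
      have hdec : ((c :: cs).drop K.toNat).length < n := by
        simp only [List.length_drop, List.length_cons]
        omega
      rw [ih _ hdec _ rfl]
      conv_rhs => rw [pvAltGo]
      simp

-- ===== VERDICT (by name: the statement is the Claim_ definition above) =====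
theorem getMultiBlockFromText_spec : Claim_equal_getMultiBlockFromText := by
  intro msg K B _ hpre
  unfold Spec_getMultiBlockFromText getMultiBlockFromText getMultiBlockFromText_alt
  by_cases hK : K ≤ 0
  · -- negative step: A's range is empty, B returns [] from its guard
    rw [dif_pos hK, PySem.Str.len_eq,
      pvRange_nil_of_neg 0 _ K (by unfold Pre_getMultiBlockFromText at hpre; omega)
        (Int.natCast_nonneg _)]
    simp
  · rw [dif_neg hK]
    have hK' : 0 < K := by omega
    have hinner : ∀ (a : List Int), ∀ bs ∈ PySem.List.pyRange 0 (PySem.Str.len msg) K,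
        (fun blockInt blockStart =>
          let block := PySem.List.slice msg.toList (some blockStart)
            (some (blockStart + K))
          let st := block.foldl
            (fun (st : Int × Nat) val => (st.1 + (val.toNat : Int) * B ^ st.2, st.2 + 1))
            (0, 0)
          blockInt ++ [st.1]) a bs
          = a ++ [pvHorner B (PySem.List.slice msg.toList (some bs) (some (bs + K)))] := by
      intro a bs _
      simp only [pvHorner_eq, pow_zero, one_mul, zero_add]
    rw [PySem.List.foldl_congr_mem _ _ _ _ hinner, PySem.Str.len_eq]
    exact pvMain K B hK' msg.toList.length msg.toList rfl []

@[simp]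
theorem getMultiBlockFromText_raises : Claim_raises_getMultiBlockFromText := by
  unfold Claim_raises_getMultiBlockFromText
  constructor
  · intro msg K B _ hr
    unfold Raises_getMultiBlockFromText at hr
    unfold Pre_getMultiBlockFromText
    omega
  · exact ⟨by decide, by decide, by decide⟩
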